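-- pv_equiv track=rewrite | github.com/kayats111/NLPatient | Server/DataManager/API.py | validateRequestSchema
-- ===== SOURCE A (Python) =====
-- from typing import Dict, List, Set
--
-- def validateRequestSchema(request: dict, schema: Set[str]) -> bool:
--     for field in schema:
--         if field not in request:
--             return False
--
--     for key in request:
--         if key not in schema:
--             return False
--
--     return True
-- ===== SOURCE B (Python) =====
-- def validateRequestSchema(request: dict, schema) -> bool:
--     # Canonical-form comparison: sort each key collection and squeeze out
--     # adjacent duplicates, then compare the two canonical lists directly.
--     def sorted_unique(keys):
--         out = []
--         for k in sorted(keys):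
--             if not out or out[-1] != k:
--                 out.append(k)
--         return out
--     return sorted_unique(request) == sorted_unique(schema)
-- ===== Notes on version B (the rewrite author's own statement) =====
-- stated objective: alternative
-- what changed: Instead of testing membership in both directions, B reduces each key collection to a canonical form (sort, then drop adjacent duplicates) and compares the two canonical lists for equality.
import Mathlib
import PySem

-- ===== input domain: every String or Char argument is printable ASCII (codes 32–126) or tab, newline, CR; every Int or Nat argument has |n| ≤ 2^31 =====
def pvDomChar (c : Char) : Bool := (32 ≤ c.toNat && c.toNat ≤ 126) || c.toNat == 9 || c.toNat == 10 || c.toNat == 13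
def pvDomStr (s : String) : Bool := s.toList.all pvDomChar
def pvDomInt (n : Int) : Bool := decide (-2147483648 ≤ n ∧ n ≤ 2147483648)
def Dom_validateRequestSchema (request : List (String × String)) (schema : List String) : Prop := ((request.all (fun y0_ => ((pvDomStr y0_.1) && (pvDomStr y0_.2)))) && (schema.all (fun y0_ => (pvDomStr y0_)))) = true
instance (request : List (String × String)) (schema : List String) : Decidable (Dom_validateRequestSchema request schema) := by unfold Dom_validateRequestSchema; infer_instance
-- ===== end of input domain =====

-- B replaces A's two membership loops by comparing the canonical (sorted, adjacent-dedup'd) forms of the two key collections; alternative decomposition, same results.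

-- ===== PORT A =====
-- for field in schema: if field not in request: return False; for key in request: if key not in schema: return False; return True
def validateRequestSchema (request : List (String × String)) (schema : List String) : Bool :=
  (schema.all (fun field => request.any (fun p => p.1 == field))) &&
  (request.all (fun kv => schema.contains kv.1))

-- ===== PORT B =====
-- loop body: 'if not out or out[-1] != k: out.append(k)'; for nonempty out, out[-1] is
-- out.getLast?; for empty out getLast? = none ≠ some k, so the single getLast? test is
-- exactly the Python disjunction.
def suStep (out : List String) (k : String) : List String :=
  if out.getLast? != some k then out ++ [k] else out

-- 'sorted_unique(keys)': sort, then fold the append-if-new-adjacent loop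
def sortedUnique (keys : List String) : List String :=
  (PySem.List.sorted keys (fun x => x) false).foldl suStep []

-- 'return sorted_unique(request) == sorted_unique(schema)' (iterating a dict yields its keys)
def validateRequestSchema_alt (request : List (String × String)) (schema : List String) : Bool :=
  sortedUnique (request.map Prod.fst) == sortedUnique schema

-- ===== PRECONDITION & SPEC =====
def Spec_validateRequestSchema (request : List (String × String)) (schema : List String) (out : Bool) : Prop := out = validateRequestSchema_alt request schema
instance (request : List (String × String)) (schema : List String) (out : Bool) : Decidable (Spec_validateRequestSchema request schema out) := by unfold Spec_validateRequestSchema; infer_instance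

-- ===== CLAIM =====
def Claim_equal_validateRequestSchema : Prop := ∀ (request : List (String × String)) (schema : List String), Dom_validateRequestSchema request schema → Spec_validateRequestSchema request schema (validateRequestSchema request schema)

-- ===== LEMMAS AND PROOFS =====

-- loop invariant for the dedup fold: over a ≤-sorted input and an accumulator whose last
-- element bounds it, the fold yields a strictly increasing list with the union of members
theorem suFold_invariant (s : List String) : ∀ (acc : List String),
    s.Pairwise (· ≤ ·) → acc.Pairwise (· < ·) →
    (∀ m ∈ acc.getLast?, (∀ a ∈ acc, a ≤ m) ∧ (∀ b ∈ s, m ≤ b)) →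
    ((s.foldl suStep acc).Pairwise (· < ·)) ∧
    (∀ x, x ∈ s.foldl suStep acc ↔ x ∈ acc ∨ x ∈ s) := by
  induction s with
  | nil => intro acc _ hacc _; simpa using hacc
  | cons k t ih =>
    intro acc hs hacc hlast
    obtain ⟨hk, ht⟩ := List.pairwise_cons.mp hs
    simp only [List.foldl_cons]
    by_cases h : acc.getLast? = some k
    · have hstep : suStep acc k = acc := by simp [suStep, h]
      rw [hstep]
      have hmem : k ∈ acc := List.mem_of_getLast? h
      have := ih acc ht hacc (by
        intro m hm
        rw [h, Option.mem_some_iff] at hm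
        subst hm
        exact ⟨(hlast k (by simp [h])).1, hk⟩)
      refine ⟨this.1, fun x => ?_⟩
      rw [this.2 x]
      constructor
      · rintro (hx | hx)
        · exact Or.inl hx
        · exact Or.inr (List.mem_cons_of_mem _ hx)
      · rintro (hx | hx)
        · exact Or.inl hx
        · rcases List.mem_cons.mp hx with rfl | hx
          · exact Or.inl hmem
          · exact Or.inr hx
    · have hstep : suStep acc k = acc ++ [k] := by simp [suStep, h]
      rw [hstep]
      have hltk : ∀ a ∈ acc, a < k := by
        intro a ha
        match hg : acc.getLast? with
        | none => exact absurd ha (by simp [List.getLast?_eq_none_iff.mp hg])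
        | some m =>
          obtain ⟨h1, h2⟩ := hlast m (by simp [hg])
          have hmk : m ≤ k := h2 k (by simp)
          have : m ≠ k := fun e => h (e ▸ hg)
          exact lt_of_le_of_lt (h1 a ha) (lt_of_le_of_ne hmk this)
      have hacc' : (acc ++ [k]).Pairwise (· < ·) := by
        rw [List.pairwise_append]
        exact ⟨hacc, by simp, by simpa using hltk⟩
      have hlast' : ∀ m ∈ (acc ++ [k]).getLast?, (∀ a ∈ acc ++ [k], a ≤ m) ∧ (∀ b ∈ t, m ≤ b) := by
        intro m hm
        simp only [List.getLast?_append, List.getLast?_singleton, Option.some_or,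
          Option.mem_some_iff] at hm
        subst hm
        refine ⟨fun a ha => ?_, hk⟩
        rcases List.mem_append.mp ha with ha | ha
        · exact le_of_lt (hltk a ha)
        · simp_all
      have := ih (acc ++ [k]) ht hacc' hlast'
      refine ⟨this.1, fun x => ?_⟩
      rw [this.2 x]
      simp [or_assoc, or_comm, or_left_comm]

theorem sortedUnique_pairwise (l : List String) : (sortedUnique l).Pairwise (· < ·) :=
  (suFold_invariant (PySem.List.sorted l (fun x => x) false) []
    (PySem.List.sorted_pairwise l (fun x => x)) (by simp) (by simp)).1

theorem mem_sortedUnique (l : List String) (x : String) : x ∈ sortedUnique l ↔ x ∈ l := by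
  unfold sortedUnique
  rw [(suFold_invariant (PySem.List.sorted l (fun x => x) false) []
    (PySem.List.sorted_pairwise l (fun x => x)) (by simp) (by simp)).2 x]
  simp [PySem.List.mem_sorted]

-- the canonical form is sorted(set(l)): strictly increasing and a permutation of the distinct elements
theorem sortedUnique_eq_sorted_ofList (l : List String) :
    sortedUnique l = PySem.List.sorted (PySem.Set.ofList l) (fun x => x) false := by
  refine (PySem.List.sorted_eq_of_perm_of_pairwise_lt (PySem.Set.ofList l) (sortedUnique l) (fun x => x) ?_ ?_).symm
  · rw [List.perm_ext_iff_of_nodup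
      ((sortedUnique_pairwise l).imp ne_of_lt) (PySem.Set.nodup_ofList l)]
    intro a
    rw [mem_sortedUnique, PySem.Set.mem_ofList]
  · exact sortedUnique_pairwise l

-- ===== VERDICT =====
theorem validateRequestSchema_spec : Claim_equal_validateRequestSchema := by
  intro request schema _
  unfold Spec_validateRequestSchema validateRequestSchema validateRequestSchema_alt
  rw [sortedUnique_eq_sorted_ofList, sortedUnique_eq_sorted_ofList, Bool.eq_iff_iff,
    beq_iff_eq, PySem.List.sorted_id_eq_sorted_id_iff_perm,
    List.perm_ext_iff_of_nodup (PySem.Set.nodup_ofList _) (PySem.Set.nodup_ofList _)]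
  simp only [Bool.and_eq_true, List.all_eq_true, List.any_eq_true, PySem.Set.mem_ofList,
    List.mem_map, List.contains_iff_mem, beq_iff_eq]
  constructor
  · rintro ⟨h1, h2⟩ x
    constructor
    · rintro ⟨p, hp, rfl⟩; exact h2 p hp
    · intro hx; obtain ⟨p, hp, hpx⟩ := h1 x hx; exact ⟨p, hp, hpx⟩
  · intro h
    refine ⟨fun f hf => ?_, fun kv hkv => ?_⟩
    · obtain ⟨p, hp, hpx⟩ := (h f).2 hf; exact ⟨p, hp, hpx⟩
    · exact (h kv.1).1 ⟨kv, hkv, rfl⟩
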